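-- pv_equiv track=rewrite | github.com/paiml/depyler | examples/hard_prac_mem_compact.py | mc_count_gaps
-- ===== SOURCE A (Python) =====
-- def mc_count_gaps(heap: list[int], heap_size: int) -> int:
--     """Count number of gaps (contiguous free runs)."""
--     gaps: int = 0
--     in_gap: int = 0
--     i: int = 0
--     while i < heap_size:
--         h: int = heap[i]
--         if h == 0:
--             if in_gap == 0:
--                 gaps = gaps + 1
--                 in_gap = 1
--         else:
--             in_gap = 0
--         i = i + 1
--     return gaps
-- ===== SOURCE B (Python) =====
-- def mc_count_gaps(heap: list[int], heap_size: int) -> int: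
--     """Count gaps by inclusion-exclusion over staged passes:
--     gaps = (#zeros in the prefix) - (#adjacent zero-zero pairs in the prefix),
--     since every gap of length L contributes L zeros and L-1 adjacent pairs."""
--     prefix = [heap[i] for i in range(heap_size)]
--     zeros = sum(1 for v in prefix if v == 0)
--     pairs = sum(1 for a, b in zip(prefix, prefix[1:]) if a == 0 and b == 0)
--     return zeros - pairs
-- ===== Notes on version B (the rewrite author's own statement) =====
-- stated objective: alternative
-- what changed: Replaces the stateful while-loop gap scan by inclusion-exclusion over staged passes: gaps = (#zeros) - (#adjacent zero-zero pairs), computed from the materialised prefix with two independent counts.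
import Mathlib
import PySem

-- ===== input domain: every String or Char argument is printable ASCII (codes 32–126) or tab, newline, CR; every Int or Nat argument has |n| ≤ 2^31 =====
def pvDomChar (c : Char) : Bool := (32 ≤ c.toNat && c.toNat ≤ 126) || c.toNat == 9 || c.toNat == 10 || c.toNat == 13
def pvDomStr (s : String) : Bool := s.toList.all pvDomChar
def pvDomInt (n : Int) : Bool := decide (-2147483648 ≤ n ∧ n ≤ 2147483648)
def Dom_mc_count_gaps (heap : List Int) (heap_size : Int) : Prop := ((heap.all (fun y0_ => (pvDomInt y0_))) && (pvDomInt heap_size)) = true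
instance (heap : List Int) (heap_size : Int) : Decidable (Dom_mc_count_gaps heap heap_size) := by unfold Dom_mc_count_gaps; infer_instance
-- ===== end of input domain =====

-- B replaces A's stateful while-loop scan by inclusion-exclusion over staged passes
-- (gaps = #zeros - #adjacent zero pairs); same O(n) cost, a different algorithm.

-- ===== PORT A =====
-- A's while loop over i = 0..heap_size-1 with state (gaps, in_gap); heap[i] via pyGetD
-- (the default is never reached inside Pre_, which puts heap_size in range).
def mc_count_gaps (heap : List Int) (heap_size : Int) : Int :=
  let r := (PySem.List.pyRange 0 heap_size 1).foldl
    (fun (s : Int × Int) (i : Int) =>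
      let h := PySem.List.pyGetD heap i 0
      if h = 0 then
        (if s.2 = 0 then (s.1 + 1, (1 : Int)) else s)
      else (s.1, 0)) ((0 : Int), (0 : Int))
  r.1

-- ===== PORT B =====
-- Source B: pre = [heap[i] for i in range(heap_size)];
--       zeros = sum over pre; pairs = sum over zip(pre, pre[1:]); zeros - pairs
def mc_count_gaps_alt (heap : List Int) (heap_size : Int) : Int :=
  let pre := (PySem.List.pyRange 0 heap_size 1).map (fun i => PySem.List.pyGetD heap i 0)
  let zeros := (pre.map (fun v => if v = 0 then (1 : Int) else 0)).sum
  let pairs := ((pre.zip (PySem.List.slice pre (some 1) none)).map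
    (fun p => if p.1 = 0 ∧ p.2 = 0 then (1 : Int) else 0)).sum
  zeros - pairs

-- ===== PRECONDITION & SPEC =====
-- Pre_ excludes exactly the inputs where Python A raises IndexError: heap_size > len(heap).
def Pre_mc_count_gaps (heap : List Int) (heap_size : Int) : Prop :=
  heap_size ≤ (heap.length : Int)
instance (heap : List Int) (heap_size : Int) : Decidable (Pre_mc_count_gaps heap heap_size) := by
  unfold Pre_mc_count_gaps; infer_instance

def pvWitness_mc_count_gaps : List Int × Int := ([0, 3, 0, 0, 5], 5)

def Spec_mc_count_gaps (heap : List Int) (heap_size : Int) (out : Int) : Prop := out = mc_count_gaps_alt heap heap_size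
instance (heap : List Int) (heap_size : Int) (out : Int) : Decidable (Spec_mc_count_gaps heap heap_size out) := by unfold Spec_mc_count_gaps; infer_instance

-- ===== CLAIM (what is proved, stated in full; the proofs are below) =====
def Claim_equal_mc_count_gaps : Prop := ∀ (heap : List Int) (heap_size : Int), Dom_mc_count_gaps heap heap_size → Pre_mc_count_gaps heap heap_size → Spec_mc_count_gaps heap heap_size (mc_count_gaps heap heap_size)

-- ===== LEMMAS AND PROOFS =====

-- A's loop step on a value (the index already resolved to heap[i]).
def mcStepA (s : Int × Int) (h : Int) : Int × Int :=
  if h = 0 then (if s.2 = 0 then (s.1 + 1, (1 : Int)) else s) else (s.1, 0)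

-- Gap count of a value list given whether the previous element was zero.
def mcGapsF (pz : Bool) : List Int → Int
  | [] => 0
  | h :: t => (if h = 0 ∧ pz = false then 1 else 0) + mcGapsF (decide (h = 0)) t

def mcZeros (l : List Int) : Int := (l.map (fun v => if v = 0 then (1 : Int) else 0)).sum
def mcPairs (l : List Int) : Int :=
  ((l.zip l.tail).map (fun p => if p.1 = 0 ∧ p.2 = 0 then (1 : Int) else 0)).sum
def mcHz : List Int → Int
  | [] => 0
  | h :: _ => if h = 0 then 1 else 0

theorem mc_foldA (l : List Int) : ∀ (g ig : Int),
    (l.foldl mcStepA (g, ig)).1 = g + mcGapsF (decide (ig ≠ 0)) l := by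
  induction l with
  | nil => intro g ig; simp [mcGapsF]
  | cons h t ih =>
    intro g ig
    by_cases h0 : h = 0
    · by_cases hig : ig = 0
      · simp [mcStepA, h0, hig, ih, mcGapsF, add_assoc]
      · simp [mcStepA, h0, hig, ih, mcGapsF]
    · simp [mcStepA, h0, ih, mcGapsF]

theorem mc_incl_excl (l : List Int) : ∀ (pz : Bool),
    mcGapsF pz l = mcZeros l - mcPairs l - (if pz then mcHz l else 0) := by
  induction l with
  | nil => intro pz; simp [mcGapsF, mcZeros, mcPairs, mcHz]
  | cons h t ih =>
    intro pz
    have hz : mcZeros (h :: t) = (if h = 0 then 1 else 0) + mcZeros t := by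
      simp [mcZeros]
    have hp : mcPairs (h :: t) = (if h = 0 then mcHz t else 0) + mcPairs t := by
      cases t with
      | nil => simp [mcPairs, mcHz]
      | cons b t' =>
        by_cases hb : b = 0 <;> by_cases h0 : h = 0 <;>
          simp [mcPairs, mcHz, hb, h0]
    rw [show mcGapsF pz (h :: t)
          = (if h = 0 ∧ pz = false then 1 else 0) + mcGapsF (decide (h = 0)) t from rfl,
        ih, hz, hp]
    by_cases h0 : h = 0 <;> cases pz <;> simp [mcHz, h0] <;> ring

-- ===== VERDICT (by name: the statement is the Claim_ definition above) =====
theorem mc_count_gaps_spec : Claim_equal_mc_count_gaps := by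
  intro heap heap_size _ _
  show mc_count_gaps heap heap_size = mc_count_gaps_alt heap heap_size
  simp only [mc_count_gaps, mc_count_gaps_alt, PySem.List.slice_from_one]
  have hstep : (fun (s : Int × Int) (i : Int) =>
      if PySem.List.pyGetD heap i 0 = 0 then
        (if s.2 = 0 then (s.1 + 1, (1 : Int)) else s)
      else (s.1, 0)) = fun s i => mcStepA s (PySem.List.pyGetD heap i 0) := rfl
  rw [hstep, ← List.foldl_map, mc_foldA, mc_incl_excl]
  simp [mcZeros, mcPairs]
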